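-- pv_equiv track=rewrite | github.com/JingXiaoyi/PARE | code/integrate.py | make_user_seq
-- ===== SOURCE A (Python) =====
-- def make_user_seq(data):
--     dict = {}
--     user_seq = []
--     for i in range(len(data)):
--         user = data[i][0]
--         if user not in dict:
--             dict[user] = []
--         dict[user].append(i)
--     for key in dict:
--         dict[key].sort(key=lambda x: data[x][3])
--     for i in range(len(dict)):
--         line = [data[i][1] for i in dict[i]]
--         line += [0, 0]
--         user_seq.append(line)
--
--     return user_seq
-- ===== SOURCE B (Python) =====
-- def make_user_seq(data):
--     order = sorted(range(len(data)), key=lambda x: (data[x][0], data[x][3]))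
--     groups = {}
--     for i in order:
--         groups.setdefault(data[i][0], []).append(i)
--     user_seq = []
--     for u in range(len(groups)):
--         user_seq.append([data[i][1] for i in groups[u]] + [0, 0])
--     return user_seq
-- ===== Notes on version B (the rewrite author's own statement) =====
-- stated objective: alternative
-- what changed: B replaces A's three passes (group indices into a dict of unsorted buckets, then sort every bucket in place by timestamp) by one global stable sort of all indices by the (user, timestamp) pair, after which a single setdefault pass yields every user's bucket already in timestamp order.
import Mathlib
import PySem

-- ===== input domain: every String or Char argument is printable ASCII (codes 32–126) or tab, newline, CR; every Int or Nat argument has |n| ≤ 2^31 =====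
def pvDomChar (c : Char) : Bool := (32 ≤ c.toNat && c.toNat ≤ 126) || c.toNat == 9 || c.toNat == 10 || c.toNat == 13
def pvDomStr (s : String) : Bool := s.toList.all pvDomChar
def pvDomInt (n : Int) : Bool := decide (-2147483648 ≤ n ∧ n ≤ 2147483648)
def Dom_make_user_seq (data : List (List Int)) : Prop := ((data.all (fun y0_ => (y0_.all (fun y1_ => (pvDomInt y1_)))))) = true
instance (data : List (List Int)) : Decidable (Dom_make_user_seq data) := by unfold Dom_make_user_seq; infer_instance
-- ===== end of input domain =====

-- B replaces A's group-then-sort-each-bucket by ONE global stable sort of the indices by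
-- (user, timestamp) followed by a single grouping pass; the return value is compared
-- (each Python mutates only its own local dict/lists).

-- data[i][c] (both Pythons read cells this way); exact via PySem.List.pyGetD under Pre_ (rows long enough, index from range)
def pvCol (data : List (List Int)) (i c : Int) : Int :=
  PySem.List.pyGetD (PySem.List.pyGetD data i []) c 0

-- ===== PORT A =====
def make_user_seq (data : List (List Int)) : List (List Int) :=
  let d : PySem.Dict Int (List Int) :=
    (PySem.List.pyRange 0 (data.length : Int) 1).foldl (fun d i =>
      let user := pvCol data i 0
      let d := if d.contains user then d else d.insert user []
      d.modify user [] (fun l => l ++ [i])) PySem.Dict.empty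
  let d :=
    d.keys.foldl (fun d key =>
      d.modify key [] (fun l => PySem.List.sorted l (fun x => pvCol data x 3) false)) d
  (PySem.List.pyRange 0 (d.size : Int) 1).foldl (fun user_seq i =>
    let line := (d.getD i []).map (fun j => pvCol data j 1)
    user_seq ++ [line ++ [0, 0]]) []

-- ===== PORT B =====
def make_user_seq_alt (data : List (List Int)) : List (List Int) :=
  let order := PySem.List.sorted2 (PySem.List.pyRange 0 (data.length : Int) 1)
    (fun x => pvCol data x 0) (fun x => pvCol data x 3) false
  -- groups.setdefault(data[i][0], []).append(i): exactly d[k] = d.get(k, []) + [i], i.e. Dict.modify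
  let groups : PySem.Dict Int (List Int) :=
    order.foldl (fun g i => g.modify (pvCol data i 0) [] (fun l => l ++ [i])) PySem.Dict.empty
  (PySem.List.pyRange 0 (groups.size : Int) 1).foldl (fun user_seq u =>
    user_seq ++ [(groups.getD u []).map (fun i => pvCol data i 1) ++ [0, 0]]) []

-- ===== PRECONDITION & SPEC =====
-- Pre_ excludes exactly the inputs on which A raises: a row shorter than 4 (IndexError) or a
-- set of user ids other than {0..k-1} (KeyError on dict[i] in A's final loop).
def Pre_make_user_seq (data : List (List Int)) : Prop :=
  (∀ row ∈ data, 4 ≤ row.length) ∧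
  (∀ u ∈ PySem.List.dedup (data.map (fun row => PySem.List.pyGetD row 0 0)),
      0 ≤ u ∧ u < ((PySem.List.dedup (data.map (fun row => PySem.List.pyGetD row 0 0))).length : Int))
instance (data : List (List Int)) : Decidable (Pre_make_user_seq data) := by
  unfold Pre_make_user_seq; infer_instance
def pvWitness_make_user_seq : List (List Int) := [[0, 7, 9, 2], [1, 8, 9, 1], [0, 6, 9, 0]]

def Spec_make_user_seq (data : List (List Int)) (out : List (List Int)) : Prop := out = make_user_seq_alt data
instance (data : List (List Int)) (out : List (List Int)) : Decidable (Spec_make_user_seq data out) := by unfold Spec_make_user_seq; infer_instance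

-- ===== CLAIM (what is proved, stated in full; the proofs are below) =====
def Claim_equal_make_user_seq : Prop := ∀ (data : List (List Int)), Dom_make_user_seq data → Pre_make_user_seq data → Spec_make_user_seq data (make_user_seq data)

-- ===== LEMMAS AND PROOFS =====

-- A's second loop: after sorting every bucket of a Nodup key list, bucket u is sorted iff u is a key
theorem sort_fold_getD (data : List (List Int)) (ks : List Int) (hnd : ks.Nodup)
    (d : PySem.Dict Int (List Int)) (u : Int) :
    ((ks.foldl (fun d key =>
        d.modify key [] (fun l => PySem.List.sorted l (fun x => pvCol data x 3) false)) d).getD u [])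
      = if u ∈ ks then PySem.List.sorted (d.getD u []) (fun x => pvCol data x 3) false
        else d.getD u [] := by
  induction ks generalizing d with
  | nil => simp
  | cons k t ih =>
    simp only [List.foldl_cons, List.mem_cons]
    rw [ih hnd.of_cons]
    by_cases h : u = k
    · subst h
      have : u ∉ t := (List.nodup_cons.mp hnd).1
      simp [this, PySem.Dict.getD_modify_self]
    · simp [PySem.Dict.getD_modify, h]

-- a Nodup list of k integers all in [0, k) contains every integer of [0, k)
theorem pigeonhole_int (l : List Int) (hnd : l.Nodup)
    (hb : ∀ x ∈ l, 0 ≤ x ∧ x < (l.length : Int)) (u : Int) (h0 : 0 ≤ u)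
    (hu : u < (l.length : Int)) : u ∈ l := by
  classical
  set ln := l.map Int.toNat with hln
  have hndn : ln.Nodup := by
    refine hnd.map_on ?_
    intro x hx y hy hxy
    have := (hb x hx).1; have := (hb y hy).1
    omega
  have hsub : ln.toFinset ⊆ Finset.range l.length := by
    intro a ha
    simp only [List.mem_toFinset, hln, List.mem_map] at ha
    obtain ⟨x, hx, rfl⟩ := ha
    have := (hb x hx).1; have := (hb x hx).2
    simp only [Finset.mem_range]
    omega
  have hcard : ln.toFinset.card = l.length := by
    rw [List.toFinset_card_of_nodup hndn]; simp [hln]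
  have heq : ln.toFinset = Finset.range l.length :=
    Finset.eq_of_subset_of_card_le hsub (by simp [hcard])
  have : u.toNat ∈ ln.toFinset := by
    rw [heq]; simp only [Finset.mem_range]; omega
  simp only [List.mem_toFinset, hln, List.mem_map] at this
  obtain ⟨x, hx, hxeq⟩ := this
  have := (hb x hx).1
  have : x = u := by omega
  subst this; exact hx

theorem pv_update_self (s : PySem.Set Int) (l : List Int) (h : ∀ x ∈ l, x ∈ s) :
    PySem.Set.update s l = s := by
  induction l generalizing s with
  | nil => rfl
  | cons a t ih =>
    have hadd : PySem.Set.add s a = s := by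
      simp [PySem.Set.add, h a (List.mem_cons_self ..)]
    have : PySem.Set.update s (a :: t) = PySem.Set.update (PySem.Set.add s a) t := rfl
    rw [this, hadd, ih s (fun x hx => h x (List.mem_cons_of_mem _ hx))]

-- A's first-loop body: insert-if-absent then append IS modify with default []
theorem pv_body_eq (data : List (List Int)) (d : PySem.Dict Int (List Int)) (i : Int) :
    ((if d.contains (pvCol data i 0) then d else d.insert (pvCol data i 0) []).modify
        (pvCol data i 0) [] (fun l => l ++ [i]))
      = d.modify (pvCol data i 0) [] (fun l => l ++ [i]) := by
  by_cases h : d.contains (pvCol data i 0)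
  · simp [h]
  · have h1 : (d.insert (pvCol data i 0) []).modify (pvCol data i 0) [] (fun l => l ++ [i])
        = (d.insert (pvCol data i 0) []).insert (pvCol data i 0)
            (((d.insert (pvCol data i 0) []).getD (pvCol data i 0) []) ++ [i]) := rfl
    rw [if_neg h, h1, PySem.Dict.insert_insert_self, PySem.Dict.getD_insert_self]
    have h2 : d.modify (pvCol data i 0) [] (fun l => l ++ [i])
        = d.insert (pvCol data i 0) ((d.getD (pvCol data i 0) []) ++ [i]) := rfl
    rw [h2, PySem.Dict.getD_of_not_contains (h := by simpa using h)]

-- tuple-lex insert order used by sorted2 on Int keys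
def pvLtT {α : Type} (f g : α → Int) (a b : α) : Bool :=
  decide (f a < f b) || !decide (f b < f a) && decide (g a < g b)

-- filter of one lex insertion = insertion by the second key into the filter (acc sorted, keys equal on the class)
theorem pv_filter_insertBy {α : Type} (f g : α → Int) (u : Int) (x : α) (acc : List α)
    (hs : acc.Pairwise (fun a b => pvLtT f g b a = false)) :
    (PySem.List.insertBy (pvLtT f g) x acc).filter (fun i => f i == u)
      = if f x == u then
          PySem.List.insertBy (fun a b => decide (g a < g b)) x
            (acc.filter (fun i => f i == u))
        else acc.filter (fun i => f i == u) := by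
  induction acc with
  | nil =>
    simp only [PySem.List.insertBy]
    split <;> simp_all [PySem.List.insertBy]
  | cons y ys ih =>
    obtain ⟨hy, hys⟩ := List.pairwise_cons.mp hs
    by_cases hxy : pvLtT f g x y = true
    · -- x goes in front of y
      rw [show PySem.List.insertBy (pvLtT f g) x (y :: ys) = x :: y :: ys by
        simp [PySem.List.insertBy, hxy]]
      by_cases hqx : (f x == u) = true
      · rw [if_pos hqx]
        have hfx : f x = u := by simpa using hqx
        -- x is lex-smaller than every element of y :: ys, hence g-smaller than every filtered one
        have hlt : ∀ z ∈ y :: ys, (f z == u) = true → decide (g x < g z) = true := by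
          intro z hz hqz
          have hfz : f z = u := by simpa using hqz
          have hxyP : f x < f y ∨ (¬ f y < f x ∧ g x < g y) := by
            simpa [pvLtT, Bool.or_eq_true, Bool.and_eq_true, decide_eq_true_eq] using hxy
          rcases List.mem_cons.mp hz with rfl | hz'
          · simp only [decide_eq_true_eq]
            omega
          · have hzy := hy z hz'
            have hzyP : ¬ (f z < f y ∨ (¬ f y < f z ∧ g z < g y)) := by
              simpa [pvLtT, Bool.or_eq_true, Bool.and_eq_true, decide_eq_true_eq] using hzy
            simp only [decide_eq_true_eq]
            omega
        rw [show (x :: y :: ys).filter (fun i => f i == u)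
            = x :: (y :: ys).filter (fun i => f i == u) by simp [List.filter_cons, hqx]]
        cases hfilt : (y :: ys).filter (fun i => f i == u) with
        | nil => simp [PySem.List.insertBy]
        | cons z zs =>
          have hzmem : z ∈ (y :: ys).filter (fun i => f i == u) := by
            rw [hfilt]; exact List.mem_cons_self ..
          have hz := List.mem_filter.mp hzmem
          rw [show PySem.List.insertBy (fun a b => decide (g a < g b)) x (z :: zs)
              = x :: z :: zs by simp [PySem.List.insertBy, hlt z hz.1 hz.2]]
      · simp only [hqx]
        simp [List.filter_cons, hqx]
    · -- x passes y
      rw [show PySem.List.insertBy (pvLtT f g) x (y :: ys)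
          = y :: PySem.List.insertBy (pvLtT f g) x ys by
        simp [PySem.List.insertBy, hxy]]
      have ihy := ih hys
      by_cases hqx : (f x == u) = true
      · rw [if_pos hqx] at ihy ⊢
        by_cases hqy : (f y == u) = true
        · have hfx : f x = u := by simpa using hqx
          have hfy : f y = u := by simpa using hqy
          have hgxy : ¬ g x < g y := by
            have : ¬ (f x < f y ∨ (¬ f y < f x ∧ g x < g y)) := by
              simpa [pvLtT, Bool.or_eq_true, Bool.and_eq_true, decide_eq_true_eq] using hxy
            omega
          rw [show (y :: PySem.List.insertBy (pvLtT f g) x ys).filter (fun i => f i == u)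
              = y :: (PySem.List.insertBy (pvLtT f g) x ys).filter (fun i => f i == u) by
            simp [hqy]]
          rw [show (y :: ys).filter (fun i => f i == u)
              = y :: ys.filter (fun i => f i == u) by simp [hqy]]
          rw [show PySem.List.insertBy (fun a b => decide (g a < g b)) x
                (y :: ys.filter (fun i => f i == u))
              = y :: PySem.List.insertBy (fun a b => decide (g a < g b)) x
                  (ys.filter (fun i => f i == u)) by
            simp [PySem.List.insertBy, hgxy]]
          rw [ihy]
        · simp only [List.filter_cons, hqy, ihy]
          simp
      · rw [if_neg hqx] at ihy ⊢
        simp [List.filter_cons, ihy]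

theorem pv_insertBy_pairwise {α : Type} (f g : α → Int) (x : α) (acc : List α)
    (hs : acc.Pairwise (fun a b => pvLtT f g b a = false)) :
    (PySem.List.insertBy (pvLtT f g) x acc).Pairwise (fun a b => pvLtT f g b a = false) := by
  induction acc with
  | nil => simp [PySem.List.insertBy]
  | cons y ys ih =>
    obtain ⟨hy, hys⟩ := List.pairwise_cons.mp hs
    by_cases hxy : pvLtT f g x y = true
    · rw [show PySem.List.insertBy (pvLtT f g) x (y :: ys) = x :: y :: ys by
        simp [PySem.List.insertBy, hxy]]
      refine List.pairwise_cons.mpr ⟨?_, hs⟩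
      intro z hz
      have hxyP : f x < f y ∨ (¬ f y < f x ∧ g x < g y) := by
        simpa [pvLtT, Bool.or_eq_true, Bool.and_eq_true, decide_eq_true_eq] using hxy
      rcases List.mem_cons.mp hz with rfl | hz'
      · simp only [pvLtT, Bool.or_eq_false_iff, Bool.and_eq_false_iff,
          decide_eq_false_iff_not]
        constructor
        · omega
        · by_cases h : f x < f z
          · left; simpa using h
          · right; omega
      · have hzy := hy z hz'
        have hzyP : ¬ (f z < f y ∨ (¬ f y < f z ∧ g z < g y)) := by
          simpa [pvLtT, Bool.or_eq_true, Bool.and_eq_true, decide_eq_true_eq] using hzy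
        simp only [pvLtT, Bool.or_eq_false_iff, Bool.and_eq_false_iff,
          decide_eq_false_iff_not]
        constructor
        · omega
        · by_cases h : f x < f z
          · left; simpa using h
          · right; omega
    · rw [show PySem.List.insertBy (pvLtT f g) x (y :: ys)
          = y :: PySem.List.insertBy (pvLtT f g) x ys by
        simp [PySem.List.insertBy, hxy]]
      refine List.pairwise_cons.mpr ⟨?_, ih hys⟩
      intro z hz
      rcases (PySem.List.mem_insertBy ..).mp hz with rfl | hz'
      · simpa using hxy
      · exact hy z hz'

theorem pv_filter_sort_fold {α : Type} (f g : α → Int) (u : Int) (xs : List α)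
    (acc : List α) (hs : acc.Pairwise (fun a b => pvLtT f g b a = false)) :
    (xs.foldl (fun acc x => PySem.List.insertBy (pvLtT f g) x acc) acc).filter (fun i => f i == u)
      = (xs.filter (fun i => f i == u)).foldl
          (fun acc x => PySem.List.insertBy (fun a b => decide (g a < g b)) x acc)
          (acc.filter (fun i => f i == u)) := by
  induction xs generalizing acc with
  | nil => rfl
  | cons x t ih =>
    simp only [List.foldl_cons, List.filter_cons]
    rw [ih _ (pv_insertBy_pairwise f g x acc hs), pv_filter_insertBy f g u x acc hs]
    by_cases hqx : (f x == u) = true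
    · simp [hqx]
    · simp [hqx]


theorem pv_ofList_perm_length {l1 l2 : List Int} (h : l1.Perm l2) :
    (PySem.Set.ofList l1).length = (PySem.Set.ofList l2).length := by
  refine List.Perm.length_eq ?_
  rw [List.perm_ext_iff_of_nodup (PySem.Set.nodup_ofList l1) (PySem.Set.nodup_ofList l2)]
  intro a
  simp [PySem.Set.mem_ofList, h.mem_iff]

theorem pv_main (data : List (List Int))
    (_hpre1 : ∀ row ∈ data, 4 ≤ row.length)
    (hpre2 : ∀ u ∈ PySem.List.dedup (data.map (fun row => PySem.List.pyGetD row 0 0)),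
      0 ≤ u ∧ u < ((PySem.List.dedup (data.map (fun row => PySem.List.pyGetD row 0 0))).length : Int)) :
    make_user_seq data = make_user_seq_alt data := by
  unfold make_user_seq make_user_seq_alt
  simp only []
  set idxs := PySem.List.pyRange 0 (data.length : Int) 1 with hidxs
  set ks : List Int := PySem.Set.ofList (data.map (fun row => PySem.List.pyGetD row 0 0)) with hks
  set d1 : PySem.Dict Int (List Int) := idxs.foldl (fun d i =>
      (if d.contains (pvCol data i 0) then d else d.insert (pvCol data i 0) []).modify
        (pvCol data i 0) [] (fun l => l ++ [i])) PySem.Dict.empty with hd1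
  have hd1' : d1 = idxs.foldl (fun d i => d.modify (pvCol data i 0) [] (fun l => l ++ [i]))
      PySem.Dict.empty := by
    rw [hd1]
    exact PySem.List.foldl_congr_mem _ _ _ _ (fun d i _ => pv_body_eq data d i)
  have hpair : d1 = (idxs.map (fun i => ((pvCol data i 0), i))).foldl
      (fun d p => d.modify p.1 [] (fun l => l ++ [p.2])) PySem.Dict.empty := by
    rw [hd1', List.foldl_map]
  have hgetD1 : ∀ u : Int, d1.getD u [] = idxs.filter (fun i => pvCol data i 0 == u) := by
    intro u
    rw [hpair, PySem.Dict.getD_foldl_modify_append]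
    simp [List.filter_map, List.map_map, Function.comp_def]
  have hmapU : idxs.map (fun i => pvCol data i 0)
      = data.map (fun row => PySem.List.pyGetD row 0 0) := by
    have h1 : (fun i => pvCol data i 0)
        = (fun row => PySem.List.pyGetD row 0 0) ∘ (fun i => PySem.List.pyGetD data i []) := rfl
    rw [h1, ← List.map_map, PySem.List.map_pyGetD_pyRange_zero']
  have hkeys1 : d1.keys = ks := by
    rw [hd1', PySem.Dict.keys_foldl_modify_key]
    simp [PySem.Set.update_nil_left, hmapU, hks]
  have hnd : ks.Nodup := by rw [hks]; exact PySem.Set.nodup_ofList _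
  have hb : ∀ u ∈ ks, 0 ≤ u ∧ u < (ks.length : Int) := by
    intro u hu
    have := hpre2 u (by simpa [hks] using hu)
    simpa [hks] using this
  set d2 : PySem.Dict Int (List Int) := d1.keys.foldl (fun d key =>
      d.modify key [] (fun l => PySem.List.sorted l (fun x => pvCol data x 3) false)) d1 with hd2
  have hkeys2 : d2.keys = ks := by
    rw [hd2, PySem.Dict.keys_foldl_modify, hkeys1, pv_update_self _ _ (fun x hx => hx)]
  have hsize : (d2.size : Int) = (ks.length : Int) := by
    have : d2.size = d2.keys.length := by simp [PySem.Dict.size, PySem.Dict.keys]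
    rw [this, hkeys2]
  have hgetD2 : ∀ u ∈ ks, d2.getD u []
      = PySem.List.sorted (idxs.filter (fun i => pvCol data i 0 == u))
          (fun x => pvCol data x 3) false := by
    intro u hu
    rw [hd2, hkeys1, sort_fold_getD data ks hnd d1 u, if_pos hu, hgetD1]
  set order := PySem.List.sorted2 idxs (fun x => pvCol data x 0) (fun x => pvCol data x 3) false
    with horder
  set gr : PySem.Dict Int (List Int) := order.foldl (fun g i =>
      g.modify (pvCol data i 0) [] (fun l => l ++ [i])) PySem.Dict.empty with hgr
  have hgrPair : gr = (order.map (fun i => ((pvCol data i 0), i))).foldl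
      (fun d p => d.modify p.1 [] (fun l => l ++ [p.2])) PySem.Dict.empty := by
    rw [hgr, List.foldl_map]
  have hgetDB : ∀ u : Int, gr.getD u [] = order.filter (fun i => pvCol data i 0 == u) := by
    intro u
    rw [hgrPair, PySem.Dict.getD_foldl_modify_append]
    simp [List.filter_map, List.map_map, Function.comp_def]
  have hcomm : ∀ u : Int, order.filter (fun i => pvCol data i 0 == u)
      = PySem.List.sorted (idxs.filter (fun i => pvCol data i 0 == u))
          (fun x => pvCol data x 3) false := by
    intro u
    have horder_fold : order = idxs.foldl (fun acc x =>
        PySem.List.insertBy (pvLtT (fun x => pvCol data x 0) (fun x => pvCol data x 3)) x acc)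
        [] := rfl
    rw [horder_fold,
      pv_filter_sort_fold (fun x => pvCol data x 0) (fun x => pvCol data x 3) u idxs []
        (by simp)]
    rfl
  have hkeysB : gr.keys = PySem.Set.ofList (order.map (fun i => pvCol data i 0)) := by
    rw [hgr, PySem.Dict.keys_foldl_modify_key]
    simp [PySem.Set.update_nil_left]
  have hsizeB : (gr.size : Int) = (ks.length : Int) := by
    have h1 : gr.size = gr.keys.length := by simp [PySem.Dict.size, PySem.Dict.keys]
    have h2 : (order.map (fun i => pvCol data i 0)).Perm
        (data.map (fun row => PySem.List.pyGetD row 0 0)) := by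
      rw [← hmapU]
      exact (PySem.List.sorted2_perm ..).map _
    rw [h1, hkeysB, hks, pv_ofList_perm_length h2]
  rw [hsize, hsizeB, PySem.List.foldl_append_singleton_eq_map,
    PySem.List.foldl_append_singleton_eq_map]
  apply List.map_congr_left
  intro u hu
  obtain ⟨hu0, huk⟩ := (PySem.List.mem_pyRange_one).1 hu
  have humem : u ∈ ks := pigeonhole_int ks hnd hb u hu0 huk
  rw [hgetD2 u humem, hgetDB u, hcomm u]

-- ===== VERDICT (by name: the statement is the Claim_ definition above) =====
theorem make_user_seq_spec : Claim_equal_make_user_seq := by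
  intro data _ hpre
  unfold Spec_make_user_seq
  exact pv_main data hpre.1 hpre.2
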